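-- pv_equiv track=rewrite | github.com/Arsen1302/Code-copy-detector | TestData/solutions/problem_1715_4_1.py | solution_1715_4_1
-- ===== SOURCE A (Python) =====
-- def solution_1715_4_1(low: int, high: int, a: int, b: int) -> int:
--     ct=0
--     lst=[-1]*(high+1)
--     def solution_1715_4_2(a,b,lst,i):
--         if i==0:
--             return 1
--         if i<0:
--             return 0
--         if lst[i]!=-1:
--             return lst[i]
--         lst[i]=solution_1715_4_2(a,b,lst,i-a)+solution_1715_4_2(a,b,lst,i-b)
--         return lst[i]
--     for i in range(low,high+1):
--         ct+=solution_1715_4_2(a,b,lst,i)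
--     return ct%(10**9+7)
-- ===== SOURCE B (Python) =====
-- def solution_1715_4_1(low: int, high: int, a: int, b: int) -> int:
--     if high < low:
--         return 0
--     dp = [0] * (max(high, 0) + 1)
--     if high >= 0:
--         dp[0] = 1
--     for i in range(1, high + 1):
--         dp[i] = (dp[i - a] if i - a >= 0 else 0) + (dp[i - b] if i - b >= 0 else 0)
--     ct = 0
--     for i in range(max(low, 0), high + 1):
--         ct += dp[i]
--     return ct % (10**9 + 7)
-- ===== Notes on version B (the rewrite author's own statement) =====
-- stated objective: alternative
-- what changed: Replaced the top-down memoised recursion (inner helper with a memo list mutated during recursive calls) by a bottom-up iterative DP: a dp table filled left-to-right with the same recurrence, then a plain summation loop over [max(low,0), high].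
import Mathlib
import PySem

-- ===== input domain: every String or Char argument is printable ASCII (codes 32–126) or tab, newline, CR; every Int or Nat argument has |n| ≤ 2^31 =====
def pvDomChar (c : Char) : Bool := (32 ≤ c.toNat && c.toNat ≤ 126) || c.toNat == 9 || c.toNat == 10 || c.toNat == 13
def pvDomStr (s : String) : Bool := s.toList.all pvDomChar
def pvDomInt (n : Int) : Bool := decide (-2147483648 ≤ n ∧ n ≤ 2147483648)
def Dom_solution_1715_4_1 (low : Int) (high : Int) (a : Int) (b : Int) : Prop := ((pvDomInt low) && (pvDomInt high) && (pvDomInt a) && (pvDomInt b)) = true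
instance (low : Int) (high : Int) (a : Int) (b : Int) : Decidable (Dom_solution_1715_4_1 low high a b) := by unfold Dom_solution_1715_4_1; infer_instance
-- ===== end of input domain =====

-- B replaces A's memoised recursion by a bottom-up iterative DP over the same recurrence (alternative decomposition).

-- ===== PORT A =====
-- inner function 'solution_1715_4_2' (memoised recursion); the fuel argument makes the Python
-- recursion structural in Lean: on every input admitted by Pre_ the recursion depth stays below
-- the fuel supplied at each call site, so the port computes exactly what the Python computes there.
def pvSolveA (a : Int) (b : Int) : Nat → List Int → Int → Int × List Int
  | 0, lst, _ => (0, lst)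
  | fuel + 1, lst, i =>
    if i = 0 then (1, lst)
    else if i < 0 then (0, lst)
    else if PySem.List.pyGetD lst i (-1) ≠ -1 then (PySem.List.pyGetD lst i (-1), lst)
    else
      let r1 := pvSolveA a b fuel lst (i - a)
      let r2 := pvSolveA a b fuel r1.2 (i - b)
      (r1.1 + r2.1, PySem.List.pySetD r2.2 i (r1.1 + r2.1))

def solution_1715_4_1 (low : Int) (high : Int) (a : Int) (b : Int) : Int :=
  let lst : List Int := List.replicate (high + 1).toNat (-1)
  let st := (PySem.List.pyRange low (high + 1) 1).foldl
    (fun (s : Int × List Int) i =>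
      let r := pvSolveA a b (high + 1).toNat s.2 i
      (s.1 + r.1, r.2)) (0, lst)
  PySem.Int.mod st.1 (10 ^ 9 + 7)

-- ===== PORT B =====
def solution_1715_4_1_alt (low : Int) (high : Int) (a : Int) (b : Int) : Int :=
  if high < low then 0 else
  let dp0 : List Int := List.replicate (max high 0 + 1).toNat 0
  let dp1 := if 0 ≤ high then PySem.List.pySetD dp0 0 1 else dp0
  let dp := (PySem.List.pyRange 1 (high + 1) 1).foldl
    (fun dp i =>
      PySem.List.pySetD dp i
        ((if 0 ≤ i - a then PySem.List.pyGetD dp (i - a) 0 else 0) +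
         (if 0 ≤ i - b then PySem.List.pyGetD dp (i - b) 0 else 0))) dp1
  let ct := (PySem.List.pyRange (max low 0) (high + 1) 1).foldl
    (fun ct i => ct + PySem.List.pyGetD dp i 0) 0
  PySem.Int.mod ct (10 ^ 9 + 7)

-- ===== PRECONDITION & SPEC =====
-- Pre_ excludes exactly the inputs on which Python A does not return: when the range [low, high]
-- contains a positive i and a ≤ 0 or b ≤ 0, the inner recursion never reaches 0 (or runs off the
-- end of the memo list) and A raises (RecursionError / IndexError).
def Pre_solution_1715_4_1 (low : Int) (high : Int) (a : Int) (b : Int) : Prop :=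
  (1 ≤ a ∧ 1 ≤ b) ∨ high ≤ 0 ∨ high < low
instance (low : Int) (high : Int) (a : Int) (b : Int) : Decidable (Pre_solution_1715_4_1 low high a b) := by unfold Pre_solution_1715_4_1; infer_instance
def pvWitness_solution_1715_4_1 : Int × Int × Int × Int := (0, 10, 2, 3)

def Spec_solution_1715_4_1 (low : Int) (high : Int) (a : Int) (b : Int) (out : Int) : Prop := out = solution_1715_4_1_alt low high a b
instance (low : Int) (high : Int) (a : Int) (b : Int) (out : Int) : Decidable (Spec_solution_1715_4_1 low high a b out) := by unfold Spec_solution_1715_4_1; infer_instance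

-- ===== CLAIM (what is proved, stated in full; the proofs are below) =====
def Claim_equal_solution_1715_4_1 : Prop := ∀ (low : Int) (high : Int) (a : Int) (b : Int), Dom_solution_1715_4_1 low high a b → Pre_solution_1715_4_1 low high a b → Spec_solution_1715_4_1 low high a b (solution_1715_4_1 low high a b)

-- ===== LEMMAS AND PROOFS =====

-- reference function: fgo with enough fuel computes the step-counting value f(i)
def pvF (a : Int) (b : Int) : Nat → Int → Int
  | 0, _ => 0
  | fuel + 1, i =>
    if i = 0 then 1 else if i < 0 then 0 else pvF a b fuel (i - a) + pvF a b fuel (i - b)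

def pvFref (a : Int) (b : Int) (i : Int) : Int := pvF a b (i.toNat + 1) i

lemma pvF_stable (a b : Int) (ha : 1 ≤ a) (hb : 1 ≤ b) :
    ∀ (f1 : Nat) (f2 : Nat) (i : Int), i.toNat < f1 → i.toNat < f2 →
      pvF a b f1 i = pvF a b f2 i := by
  intro f1
  induction f1 with
  | zero => intro f2 i h1 _; omega
  | succ n ih =>
    intro f2 i h1 h2
    match f2, h2 with
    | m + 1, _ =>
      simp only [pvF]
      by_cases h0 : i = 0
      · simp [h0]
      · by_cases hneg : i < 0
        · simp [h0, hneg]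
        · have hi1 : 1 ≤ i := by omega
          have hiN : 1 ≤ i.toNat := by omega
          simp only [h0, hneg, if_false]
          have hma : (i - a).toNat < n := by omega
          have hmb : (i - b).toNat < n := by omega
          have hma2 : (i - a).toNat < m := by omega
          have hmb2 : (i - b).toNat < m := by omega
          rw [ih m (i - a) hma hma2, ih m (i - b) hmb hmb2]

lemma pvF_eq_fref (a b : Int) (ha : 1 ≤ a) (hb : 1 ≤ b) (fuel : Nat) (i : Int)
    (h : i.toNat < fuel) : pvF a b fuel i = pvFref a b i :=
  pvF_stable a b ha hb fuel (i.toNat + 1) i h (by omega)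

lemma pvFref_zero (a b : Int) : pvFref a b 0 = 1 := by
  simp [pvFref, pvF]

lemma pvFref_neg (a b : Int) (i : Int) (h : i < 0) : pvFref a b i = 0 := by
  unfold pvFref pvF
  simp [show ¬ i = 0 by omega, h]

lemma pvFref_rec (a b : Int) (ha : 1 ≤ a) (hb : 1 ≤ b) (i : Int) (h : 1 ≤ i) :
    pvFref a b i = pvFref a b (i - a) + pvFref a b (i - b) := by
  conv_lhs => unfold pvFref pvF
  simp only [show ¬ i = 0 by omega, show ¬ i < 0 by omega, if_false]
  rw [pvF_eq_fref a b ha hb i.toNat (i - a) (by omega),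
      pvF_eq_fref a b ha hb i.toNat (i - b) (by omega)]

-- A-side memo invariant
def pvInvA (a b : Int) (N : Nat) (lst : List Int) : Prop :=
  lst.length = N ∧ ∀ j : Nat, j < N → lst.getD j 0 = -1 ∨ lst.getD j 0 = pvFref a b j

lemma pvSolveA_spec (a b : Int) (ha : 1 ≤ a) (hb : 1 ≤ b) (N : Nat) :
    ∀ (fuel : Nat) (lst : List Int) (i : Int), pvInvA a b N lst → i < (N : Int) →
      i.toNat < fuel →
      (pvSolveA a b fuel lst i).1 = pvFref a b i ∧ pvInvA a b N (pvSolveA a b fuel lst i).2 := by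
  intro fuel
  induction fuel with
  | zero => intro lst i _ _ h; omega
  | succ n ih =>
    intro lst i hinv hiN hif
    by_cases h0 : i = 0
    · subst h0
      exact ⟨by simp [pvSolveA, pvFref_zero], by simpa [pvSolveA] using hinv⟩
    · by_cases hneg : i < 0
      · exact ⟨by simp [pvSolveA, h0, hneg, pvFref_neg a b i hneg],
               by simpa [pvSolveA, h0, hneg] using hinv⟩
      · have hi1 : 1 ≤ i := by omega
        have hlen : lst.length = N := hinv.1
        have hiLt : i.toNat < lst.length := by omega
        have hget : PySem.List.pyGetD lst i (-1) = lst.getD i.toNat 0 := by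
          have h1 : PySem.List.pyGetD lst i (-1) = lst.getD i.toNat (-1) := by
            rw [show i = ((i.toNat : Nat) : Int) by omega, PySem.List.pyGetD_natCast]
            congr 1
          rw [h1, List.getD_eq_getElem lst (-1) hiLt, List.getD_eq_getElem lst 0 hiLt]
        by_cases hv : PySem.List.pyGetD lst i (-1) = -1
        · -- memo miss: recurse and store
          set p1 := pvSolveA a b n lst (i - a) with hp1
          set p2 := pvSolveA a b n p1.2 (i - b) with hp2
          have step : pvSolveA a b (n + 1) lst i =
              (p1.1 + p2.1, PySem.List.pySetD p2.2 i (p1.1 + p2.1)) := by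
            rw [hp2, hp1]; simp [pvSolveA, h0, hneg, hv]
          have h1 := ih lst (i - a) hinv (by omega) (by omega)
          rw [← hp1] at h1
          have h2 := ih p1.2 (i - b) h1.2 (by omega) (by omega)
          rw [← hp2] at h2
          have hset : PySem.List.pySetD p2.2 i (p1.1 + p2.1) =
              p2.2.set i.toNat (p1.1 + p2.1) := by
            rw [show i = ((i.toNat : Nat) : Int) by omega, PySem.List.pySetD_natCast]
            congr 1
          have hL2 : p2.2.length = N := h2.2.1
          constructor
          · rw [step, h1.1, h2.1]
            exact (pvFref_rec a b ha hb i hi1).symm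
          · rw [step, hset]
            refine ⟨by simpa using hL2, ?_⟩
            intro j hj
            by_cases hji : j = i.toNat
            · right
              have hself : (p2.2.set i.toNat (p1.1 + p2.1)).getD i.toNat 0 = p1.1 + p2.1 := by
                simp [List.getD_eq_getElem?_getD, show i.toNat < p2.2.length by omega]
              rw [hji, hself, h1.1, h2.1, show ((i.toNat : Nat) : Int) = i by omega]
              exact (pvFref_rec a b ha hb i hi1).symm
            · have hother : (p2.2.set i.toNat (p1.1 + p2.1)).getD j 0 = p2.2.getD j 0 := by
                simp [List.getD_eq_getElem?_getD, Ne.symm hji]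
              rw [hother]
              exact h2.2.2 j hj
        · -- memo hit
          have hmem := hinv.2 i.toNat (by omega)
          have hval : lst.getD i.toNat 0 = pvFref a b i := by
            rcases hmem with hm | hm
            · exact absurd (hget.trans hm) hv
            · rw [hm, show ((i.toNat : Nat) : Int) = i by omega]
          have step : pvSolveA a b (n + 1) lst i = (PySem.List.pyGetD lst i (-1), lst) := by
            simp [pvSolveA, h0, hneg, hv]
          rw [step]
          exact ⟨hget.trans hval, hinv⟩

lemma pvLoopA (a b : Int) (ha : 1 ≤ a) (hb : 1 ≤ b) (N : Nat) (F : Nat) :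
    ∀ (l : List Int) (ct : Int) (lst : List Int), pvInvA a b N lst →
      (∀ i ∈ l, i < (N : Int) ∧ i.toNat < F) →
      (l.foldl (fun (s : Int × List Int) i =>
        let r := pvSolveA a b F s.2 i
        (s.1 + r.1, r.2)) (ct, lst)).1 = ct + (l.map (pvFref a b)).sum := by
  intro l
  induction l with
  | nil => intro ct lst _ _; simp
  | cons x xs ih =>
    intro ct lst hinv hall
    have hx := hall x (by simp)
    have hs := pvSolveA_spec a b ha hb N F lst x hinv hx.1 hx.2
    simp only [List.foldl_cons, List.map_cons, List.sum_cons]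
    rw [ih (ct + (pvSolveA a b F lst x).1) _ hs.2 (fun i hi => hall i (by simp [hi]))]
    rw [hs.1]; ring

-- trivial-value lemmas for pvSolveA (used when high ≤ 0, any a b)
lemma pvSolveA_neg (a b : Int) (F : Nat) (lst : List Int) (i : Int) (h : i < 0) :
    pvSolveA a b F lst i = (0, lst) := by
  cases F with
  | zero => rfl
  | succ n => simp [pvSolveA, show ¬ i = 0 by omega, h]

lemma pvSolveA_zero (a b : Int) (F : Nat) (lst : List Int) (h : 1 ≤ F) :
    pvSolveA a b F lst 0 = (1, lst) := by
  cases F with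
  | zero => omega
  | succ n => simp [pvSolveA]

lemma pvLoopA_le0 (a b : Int) (F : Nat) :
    ∀ (l : List Int) (ct : Int) (lst : List Int),
      (∀ i ∈ l, i < 0 ∨ (i = 0 ∧ 1 ≤ F)) →
      (l.foldl (fun (s : Int × List Int) i =>
        let r := pvSolveA a b F s.2 i
        (s.1 + r.1, r.2)) (ct, lst)).1
        = ct + (l.map (fun i => if i = 0 then (1 : Int) else 0)).sum := by
  intro l
  induction l with
  | nil => intro ct lst _; simp
  | cons x xs ih =>
    intro ct lst hall
    have hx := hall x (by simp)
    simp only [List.foldl_cons, List.map_cons, List.sum_cons]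
    rcases hx with hneg | ⟨hz, hF⟩
    · rw [pvSolveA_neg a b F lst x hneg]
      rw [ih _ _ (fun i hi => hall i (by simp [hi]))]
      rw [if_neg (by omega)]; ring
    · subst hz
      rw [pvSolveA_zero a b F lst hF]
      rw [ih _ _ (fun i hi => hall i (by simp [hi]))]
      rw [if_pos rfl]; ring

-- B-side: the DP build loop with a variable upper bound (proof-only helper; the port's loop is
-- pvDpB … (high+1) by definitional unfolding)
def pvDpB (a b : Int) (dp1 : List Int) (m : Int) : List Int :=
  (PySem.List.pyRange 1 m 1).foldl
    (fun dp i =>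
      PySem.List.pySetD dp i
        ((if 0 ≤ i - a then PySem.List.pyGetD dp (i - a) 0 else 0) +
         (if 0 ≤ i - b then PySem.List.pyGetD dp (i - b) 0 else 0))) dp1

lemma pvBuildB (a b high : Int) (ha : 1 ≤ a) (hb : 1 ≤ b) (hh : 0 ≤ high) (dp1 : List Int)
    (hlen : dp1.length = high.toNat + 1) (h0 : dp1.getD 0 0 = 1) :
    ∀ (m : Nat), (m : Int) ≤ high →
      (pvDpB a b dp1 ((m : Int) + 1)).length = high.toNat + 1 ∧
      ∀ j : Nat, j ≤ m → (pvDpB a b dp1 ((m : Int) + 1)).getD j 0 = pvFref a b j := by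
  intro m
  induction m with
  | zero =>
    intro _
    have : pvDpB a b dp1 ((0 : Nat) + 1 : Int) = dp1 := by
      unfold pvDpB
      rw [PySem.List.pyRange_one_eq_nil (by omega)]
      rfl
    rw [this]
    refine ⟨hlen, ?_⟩
    intro j hj
    interval_cases j
    rw [h0, show ((0 : Nat) : Int) = 0 by norm_num, pvFref_zero]
  | succ m ih =>
    intro hm
    have ih' := ih (by push_cast at hm ⊢; omega)
    have hsplit : pvDpB a b dp1 (((m + 1 : Nat) : Int) + 1)
        = PySem.List.pySetD (pvDpB a b dp1 ((m : Int) + 1)) ((m : Int) + 1)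
            ((if 0 ≤ ((m : Int) + 1) - a then
                PySem.List.pyGetD (pvDpB a b dp1 ((m : Int) + 1)) (((m : Int) + 1) - a) 0 else 0) +
             (if 0 ≤ ((m : Int) + 1) - b then
                PySem.List.pyGetD (pvDpB a b dp1 ((m : Int) + 1)) (((m : Int) + 1) - b) 0 else 0)) := by
      unfold pvDpB
      rw [show (((m + 1 : Nat) : Int) + 1) = ((m : Int) + 1) + 1 by push_cast; ring,
          PySem.List.pyRange_one_succ_right (by omega), List.foldl_append]
      rfl
    set dpm := pvDpB a b dp1 ((m : Int) + 1) with hdpm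
    have hLm : dpm.length = high.toNat + 1 := ih'.1
    -- the value written at index m+1 is pvFref (m+1)
    have hcontrib : ∀ c : Int, 1 ≤ c →
        (if 0 ≤ ((m : Int) + 1) - c then PySem.List.pyGetD dpm (((m : Int) + 1) - c) 0 else 0)
          = pvFref a b (((m : Int) + 1) - c) := by
      intro c hc
      by_cases hge : 0 ≤ ((m : Int) + 1) - c
      · rw [if_pos hge]
        have hkm : (((m : Int) + 1) - c).toNat ≤ m := by omega
        have : PySem.List.pyGetD dpm (((m : Int) + 1) - c) 0
            = dpm.getD (((m : Int) + 1) - c).toNat 0 := by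
          rw [show ((m : Int) + 1) - c = (((((m : Int) + 1) - c).toNat : Nat) : Int) by omega,
              PySem.List.pyGetD_natCast]
          congr 1
        rw [this, ih'.2 _ hkm, show (((((m : Int) + 1) - c).toNat : Nat) : Int) = ((m : Int) + 1) - c by omega]
      · rw [if_neg hge, pvFref_neg a b _ (by omega)]
    have hval : (if 0 ≤ ((m : Int) + 1) - a then PySem.List.pyGetD dpm (((m : Int) + 1) - a) 0 else 0) +
        (if 0 ≤ ((m : Int) + 1) - b then PySem.List.pyGetD dpm (((m : Int) + 1) - b) 0 else 0)
        = pvFref a b ((m : Int) + 1) := by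
      rw [hcontrib a ha, hcontrib b hb]
      exact (pvFref_rec a b ha hb _ (by omega)).symm
    have hset : PySem.List.pySetD dpm ((m : Int) + 1)
        ((if 0 ≤ ((m : Int) + 1) - a then PySem.List.pyGetD dpm (((m : Int) + 1) - a) 0 else 0) +
         (if 0 ≤ ((m : Int) + 1) - b then PySem.List.pyGetD dpm (((m : Int) + 1) - b) 0 else 0))
        = dpm.set (m + 1) (pvFref a b ((m : Int) + 1)) := by
      rw [hval, show ((m : Int) + 1) = (((m + 1 : Nat) : Nat) : Int) by push_cast; ring,
          PySem.List.pySetD_natCast]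
    rw [hsplit, hset]
    have hm1len : m + 1 < dpm.length := by push_cast at hm; omega
    constructor
    · simp [hLm]
    · intro j hj
      by_cases hj1 : j = m + 1
      · subst hj1
        have : (dpm.set (m + 1) (pvFref a b ((m : Int) + 1))).getD (m + 1) 0
            = pvFref a b ((m : Int) + 1) := by
          simp [List.getD_eq_getElem?_getD, hm1len]
        rw [this]
        congr 1
      · have : (dpm.set (m + 1) (pvFref a b ((m : Int) + 1))).getD j 0 = dpm.getD j 0 := by
          simp [List.getD_eq_getElem?_getD, Ne.symm hj1]
        rw [this]
        exact ih'.2 j (by omega)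

-- proof-only abbreviations for the two accumulators (definitionally equal to the ports' bodies)
def pvCtA (low high a b : Int) : Int :=
  ((PySem.List.pyRange low (high + 1) 1).foldl
    (fun (s : Int × List Int) i =>
      let r := pvSolveA a b (high + 1).toNat s.2 i
      (s.1 + r.1, r.2)) (0, List.replicate (high + 1).toNat (-1))).1

def pvDp1 (high : Int) : List Int :=
  if 0 ≤ high then PySem.List.pySetD (List.replicate (max high 0 + 1).toNat 0) 0 1
  else List.replicate (max high 0 + 1).toNat 0

def pvCtB (low high a b : Int) : Int :=
  (PySem.List.pyRange (max low 0) (high + 1) 1).foldl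
    (fun ct i => ct + PySem.List.pyGetD (pvDpB a b (pvDp1 high) (high + 1)) i 0) 0

lemma pvA_eq (low high a b : Int) :
    solution_1715_4_1 low high a b = PySem.Int.mod (pvCtA low high a b) (10 ^ 9 + 7) := rfl

lemma pvB_eq (low high a b : Int) :
    solution_1715_4_1_alt low high a b
      = if high < low then 0 else PySem.Int.mod (pvCtB low high a b) (10 ^ 9 + 7) := rfl

lemma pvCt_eq (low high a b : Int) (hpre : Pre_solution_1715_4_1 low high a b) :
    pvCtA low high a b = pvCtB low high a b := by
  by_cases hh0 : high < 0
  · -- empty/negative range: every visited i is negative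
    have hA : pvCtA low high a b = 0 := by
      unfold pvCtA
      rw [pvLoopA_le0 a b ((high + 1).toNat) _ 0 _ ?_]
      · rw [List.sum_eq_zero ?_]
        · ring
        · intro x hx
          rcases List.mem_map.mp hx with ⟨i, hi, rfl⟩
          rw [PySem.List.mem_pyRange_one] at hi
          rw [if_neg (by omega)]
      · intro i hi
        rw [PySem.List.mem_pyRange_one] at hi
        left; omega
    have hB : pvCtB low high a b = 0 := by
      unfold pvCtB
      rw [PySem.List.pyRange_one_eq_nil (by omega)]
      rfl
    rw [hA, hB]
  · have hh : 0 ≤ high := by omega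
    by_cases hlh : high < low
    · -- empty loop range on both sides
      have hA : pvCtA low high a b = 0 := by
        unfold pvCtA
        rw [PySem.List.pyRange_one_eq_nil (by omega)]
        rfl
      have hB : pvCtB low high a b = 0 := by
        unfold pvCtB
        rw [PySem.List.pyRange_one_eq_nil (by omega)]
        rfl
      rw [hA, hB]
    · by_cases hab : 1 ≤ a ∧ 1 ≤ b
      · -- main case: both sides compute sums of pvFref
        obtain ⟨ha, hb⟩ := hab
        have hInv0 : pvInvA a b (high.toNat + 1) (List.replicate (high + 1).toNat (-1)) := by
          constructor
          · simp only [List.length_replicate]; omega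
          · intro j hj
            left
            rw [List.getD_eq_getElem _ 0 (by simp only [List.length_replicate]; omega),
                List.getElem_replicate]
        have hA : pvCtA low high a b
            = 0 + ((PySem.List.pyRange low (high + 1) 1).map (pvFref a b)).sum := by
          unfold pvCtA
          rw [pvLoopA a b ha hb (high.toNat + 1) ((high + 1).toNat) _ 0 _ hInv0 ?_]
          intro i hi
          rw [PySem.List.mem_pyRange_one] at hi
          constructor
          · omega
          · omega
        -- B side: dp1 facts
        have hdp1len : (pvDp1 high).length = high.toNat + 1 := by
          unfold pvDp1
          rw [if_pos hh, show (0 : Int) = ((0 : Nat) : Int) by norm_num,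
              PySem.List.pySetD_natCast]
          simp only [List.length_set, List.length_replicate]
          omega
        have hdp10 : (pvDp1 high).getD 0 0 = 1 := by
          unfold pvDp1
          rw [if_pos hh, show (0 : Int) = ((0 : Nat) : Int) by norm_num,
              PySem.List.pySetD_natCast]
          simp [List.getD_eq_getElem?_getD]
        have hB0 := pvBuildB a b high ha hb hh (pvDp1 high) hdp1len hdp10 high.toNat (by omega)
        have hdpVal : ∀ j : Nat, j ≤ high.toNat →
            (pvDpB a b (pvDp1 high) (high + 1)).getD j 0 = pvFref a b j := by
          rw [show (high + 1 : Int) = ((high.toNat : Nat) : Int) + 1 by omega]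
          exact hB0.2
        have hB : pvCtB low high a b
            = 0 + ((PySem.List.pyRange (max low 0) (high + 1) 1).map
                (fun i => PySem.List.pyGetD (pvDpB a b (pvDp1 high) (high + 1)) i 0)).sum := by
          unfold pvCtB
          rw [PySem.List.foldl_add]
        have hmapB : (PySem.List.pyRange (max low 0) (high + 1) 1).map
              (fun i => PySem.List.pyGetD (pvDpB a b (pvDp1 high) (high + 1)) i 0)
            = (PySem.List.pyRange (max low 0) (high + 1) 1).map (pvFref a b) := by
          apply List.map_congr_left
          intro i hi
          rw [PySem.List.mem_pyRange_one] at hi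
          have h0i : 0 ≤ i := by omega
          have : PySem.List.pyGetD (pvDpB a b (pvDp1 high) (high + 1)) i 0
              = (pvDpB a b (pvDp1 high) (high + 1)).getD i.toNat 0 := by
            rw [show i = ((i.toNat : Nat) : Int) by omega, PySem.List.pyGetD_natCast]
            congr 1
          rw [this, hdpVal i.toNat (by omega), show ((i.toNat : Nat) : Int) = i by omega]
        have hsplit : ((PySem.List.pyRange low (high + 1) 1).map (pvFref a b)).sum
            = ((PySem.List.pyRange (max low 0) (high + 1) 1).map (pvFref a b)).sum := by
          by_cases hlow : 0 ≤ low
          · rw [show max low 0 = low by omega]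
          · rw [show max low 0 = 0 by omega,
                PySem.List.pyRange_one_append low 0 (high + 1) (by omega) (by omega),
                List.map_append, List.sum_append,
                List.sum_eq_zero ?_, zero_add]
            intro x hx
            rcases List.mem_map.mp hx with ⟨i, hi, rfl⟩
            rw [PySem.List.mem_pyRange_one] at hi
            exact pvFref_neg a b i (by omega)
        rw [hA, hB, hmapB, hsplit]
      · -- Pre_ forces high = 0 here; both sides count the single contribution at i = 0
        have h0 : high = 0 := by
          rcases hpre with h | h | h
          · exact absurd h hab
          · omega
          · omega
        subst h0
        have hlow : low ≤ 0 := by omega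
        have hA : pvCtA low 0 a b = 1 := by
          unfold pvCtA
          rw [pvLoopA_le0 a b ((0 + 1 : Int).toNat) _ 0 _ ?_]
          · rw [PySem.List.pyRange_one_succ_right hlow, List.map_append, List.sum_append,
                List.sum_eq_zero ?_]
            · norm_num
            · intro x hx
              rcases List.mem_map.mp hx with ⟨i, hi, rfl⟩
              rw [PySem.List.mem_pyRange_one] at hi
              rw [if_neg (by omega)]
          · intro i hi
            rw [PySem.List.mem_pyRange_one] at hi
            by_cases hi0 : i = 0
            · right
              exact ⟨hi0, by norm_num⟩
            · left; omega
        have hB : pvCtB low 0 a b = 1 := by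
          unfold pvCtB
          rw [show max low 0 = 0 by omega,
              show pvDpB a b (pvDp1 0) (0 + 1) = pvDp1 0 by
                unfold pvDpB
                rw [PySem.List.pyRange_one_eq_nil (by omega)]
                rfl,
              PySem.List.pyRange_one_singleton]
          show 0 + PySem.List.pyGetD (pvDp1 0) 0 0 = 1
          rfl
        rw [hA, hB]

-- ===== VERDICT (by name: the statement is the Claim_ definition above) =====
theorem solution_1715_4_1_spec : Claim_equal_solution_1715_4_1 := by
  intro low high a b _ hpre
  unfold Spec_solution_1715_4_1
  rw [pvA_eq, pvB_eq]
  by_cases hlh : high < low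
  · rw [if_pos hlh]
    have hA : pvCtA low high a b = 0 := by
      unfold pvCtA
      rw [PySem.List.pyRange_one_eq_nil (by omega)]
      rfl
    rw [hA, PySem.Int.mod_eq_emod_of_pos (by norm_num)]
    norm_num
  · rw [if_neg hlh, pvCt_eq low high a b hpre]
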